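-- pv_equiv track=rewrite | github.com/zena876/python-homework-storage-2025 | Протасова Александра Владимировна/LAB02/2.2.py | count_text_elements
-- ===== SOURCE A (Python) =====
-- def count_text_elements(text):
--     counts = {
--         "words": 0,
--         "letters": 0,
--         "digits": 0,
--         "spaces": 0,
--         "punctuation": 0
--     }
--
--     processed_text = text.strip()
--
--     words = processed_text.split()
--     counts["words"] = len(words)
--
--     for char in processed_text:
--         if char.isalpha():
--             counts["letters"] += 1
--         elif char.isdigit():
--             counts["digits"] += 1
--         elif char.isspace():
--             counts["spaces"] += 1
--         else:
--             counts["punctuation"] += 1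
--
--     return counts
-- ===== SOURCE B (Python) =====
-- def count_text_elements(text):
--     s = text.strip()
--     letters = sum(1 for c in s if c.isalpha())
--     digits = sum(1 for c in s if c.isdigit())
--     spaces = sum(1 for c in s if c.isspace())
--     return {
--         "words": len(s.split()),
--         "letters": letters,
--         "digits": digits,
--         "spaces": spaces,
--         "punctuation": len(s) - letters - digits - spaces,
--     }
-- ===== Notes on version B (the rewrite author's own statement) =====
-- stated objective: alternative
-- what changed: Replaces the single if/elif/else counting loop updating a dict with three independent category counts over the stripped text, deriving the punctuation count as a closed-form residual len - letters - digits - spaces instead of an else branch.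
import Mathlib
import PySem

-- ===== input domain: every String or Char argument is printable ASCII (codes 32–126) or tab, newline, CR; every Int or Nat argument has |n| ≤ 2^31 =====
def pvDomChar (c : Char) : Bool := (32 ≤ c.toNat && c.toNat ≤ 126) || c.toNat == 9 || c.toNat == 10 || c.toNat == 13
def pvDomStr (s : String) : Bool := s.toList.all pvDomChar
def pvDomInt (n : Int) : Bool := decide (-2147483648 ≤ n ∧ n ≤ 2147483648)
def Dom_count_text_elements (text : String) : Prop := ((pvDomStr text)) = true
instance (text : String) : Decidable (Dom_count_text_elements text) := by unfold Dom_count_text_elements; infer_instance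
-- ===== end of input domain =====

-- B replaces A's if/elif/else dict-updating loop by three independent category counts
-- and a closed-form residual for punctuation (alternative decomposition, same cost).

-- ===== PORT A =====
def count_text_elements (text : String) : List (String × Int) :=
  let counts : PySem.Dict String Int :=
    PySem.Dict.ofList [("words", 0), ("letters", 0), ("digits", 0), ("spaces", 0), ("punctuation", 0)]
  let processed_text := PySem.Str.strip text
  let words := PySem.Str.split₀ processed_text
  let counts := counts.insert "words" (words.length : Int)
  let counts := processed_text.toList.foldl (fun counts char =>
    if PySem.Chars.isalpha char then counts.insert "letters" (counts.getD "letters" 0 + 1)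
    else if PySem.Chars.isdigit char then counts.insert "digits" (counts.getD "digits" 0 + 1)
    else if PySem.Chars.isspace char then counts.insert "spaces" (counts.getD "spaces" 0 + 1)
    else counts.insert "punctuation" (counts.getD "punctuation" 0 + 1)) counts
  counts.items

-- ===== PORT B =====
def count_text_elements_alt (text : String) : List (String × Int) :=
  let s := PySem.Str.strip text
  let cs := s.toList
  let letters : Int := (cs.countP (fun c => PySem.Chars.isalpha c) : Int)
  let digits : Int := (cs.countP (fun c => PySem.Chars.isdigit c) : Int)
  let spaces : Int := (cs.countP (fun c => PySem.Chars.isspace c) : Int)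
  [("words", ((PySem.Str.split₀ s).length : Int)), ("letters", letters), ("digits", digits),
   ("spaces", spaces), ("punctuation", (cs.length : Int) - letters - digits - spaces)]

-- ===== PRECONDITION & SPEC =====
def Spec_count_text_elements (text : String) (out : List (String × Int)) : Prop := out = count_text_elements_alt text
instance (text : String) (out : List (String × Int)) : Decidable (Spec_count_text_elements text out) := by unfold Spec_count_text_elements; infer_instance

-- ===== CLAIM (what is proved, stated in full; the proofs are below) =====
def Claim_equal_count_text_elements : Prop := ∀ (text : String), Dom_count_text_elements text → Spec_count_text_elements text (count_text_elements text)

-- ===== LEMMAS AND PROOFS =====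

-- the five-key dict of A as a function of its five values
def pvMk5 (w a b c p : Int) : PySem.Dict String Int :=
  PySem.Dict.mk [("words", w), ("letters", a), ("digits", b), ("spaces", c), ("punctuation", p)]

theorem pvMk5_ofList (w a b c p : Int) :
    PySem.Dict.ofList [("words", w), ("letters", a), ("digits", b), ("spaces", c), ("punctuation", p)] = pvMk5 w a b c p := by
  simp [pvMk5, PySem.Dict.ofList, PySem.Dict.update, PySem.Dict.insert, PySem.Dict.contains, PySem.Dict.empty]

theorem pvMk5_insert_words (w a b c p v : Int) :
    (pvMk5 w a b c p).insert "words" v = pvMk5 v a b c p := by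
  simp [pvMk5, PySem.Dict.insert, PySem.Dict.contains]

theorem pvMk5_insert_letters (w a b c p : Int) :
    (pvMk5 w a b c p).insert "letters" ((pvMk5 w a b c p).getD "letters" 0 + 1) = pvMk5 w (a + 1) b c p := by
  simp [pvMk5, PySem.Dict.insert, PySem.Dict.getD, PySem.Dict.get?, PySem.Dict.contains]

theorem pvMk5_insert_digits (w a b c p : Int) :
    (pvMk5 w a b c p).insert "digits" ((pvMk5 w a b c p).getD "digits" 0 + 1) = pvMk5 w a (b + 1) c p := by
  simp [pvMk5, PySem.Dict.insert, PySem.Dict.getD, PySem.Dict.get?, PySem.Dict.contains]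

theorem pvMk5_insert_spaces (w a b c p : Int) :
    (pvMk5 w a b c p).insert "spaces" ((pvMk5 w a b c p).getD "spaces" 0 + 1) = pvMk5 w a b (c + 1) p := by
  simp [pvMk5, PySem.Dict.insert, PySem.Dict.getD, PySem.Dict.get?, PySem.Dict.contains]

theorem pvMk5_insert_punct (w a b c p : Int) :
    (pvMk5 w a b c p).insert "punctuation" ((pvMk5 w a b c p).getD "punctuation" 0 + 1) = pvMk5 w a b c (p + 1) := by
  simp [pvMk5, PySem.Dict.insert, PySem.Dict.getD, PySem.Dict.get?, PySem.Dict.contains]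

-- character-class disjointness (the PySem predicates are range tests; these hold for every Char)
theorem pv_digit_not_alpha (c : Char) : PySem.Chars.isdigit c = true → PySem.Chars.isalpha c = false := by
  simp only [PySem.Chars.isdigit, PySem.Chars.isalpha, PySem.Chars.isupper, PySem.Chars.islower,
    Bool.and_eq_true, Bool.or_eq_false_iff, Bool.and_eq_false_iff,
    decide_eq_true_eq, decide_eq_false_iff_not, Char.le_def,
    UInt32.le_iff_toNat_le, Char.toNat_val, Char.reduceVal, UInt32.reduceToNat]
  omega

theorem pv_digit_not_space (c : Char) : PySem.Chars.isdigit c = true → PySem.Chars.isspace c = false := by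
  simp only [PySem.Chars.isdigit, PySem.Chars.isspace, Bool.and_eq_true, Bool.or_eq_false_iff,
    Bool.and_eq_false_iff, decide_eq_true_eq, decide_eq_false_iff_not, Char.le_def,
    UInt32.le_iff_toNat_le, Char.toNat_val, Char.reduceVal, UInt32.reduceToNat]
  omega

theorem pv_alpha_not_space (c : Char) : PySem.Chars.isalpha c = true → PySem.Chars.isspace c = false := by
  simp only [PySem.Chars.isalpha, PySem.Chars.isupper, PySem.Chars.islower, PySem.Chars.isspace,
    Bool.and_eq_true, Bool.or_eq_true, Bool.or_eq_false_iff, Bool.and_eq_false_iff,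
    decide_eq_true_eq, decide_eq_false_iff_not, Char.le_def,
    UInt32.le_iff_toNat_le, Char.toNat_val, Char.reduceVal, UInt32.reduceToNat]
  omega

-- A's loop over any char list, from any five-key dict state
theorem pv_fold5 (l : List Char) (w a b c p : Int) :
    l.foldl (fun counts char =>
      if PySem.Chars.isalpha char then counts.insert "letters" (counts.getD "letters" 0 + 1)
      else if PySem.Chars.isdigit char then counts.insert "digits" (counts.getD "digits" 0 + 1)
      else if PySem.Chars.isspace char then counts.insert "spaces" (counts.getD "spaces" 0 + 1)
      else counts.insert "punctuation" (counts.getD "punctuation" 0 + 1)) (pvMk5 w a b c p)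
    = pvMk5 w (a + (l.countP (fun c => PySem.Chars.isalpha c) : Int))
              (b + (l.countP (fun c => PySem.Chars.isdigit c) : Int))
              (c + (l.countP (fun c => PySem.Chars.isspace c) : Int))
              (p + (l.countP (fun c => !PySem.Chars.isalpha c && !PySem.Chars.isdigit c && !PySem.Chars.isspace c) : Int)) := by
  induction l generalizing w a b c p with
  | nil => simp
  | cons x xs ih =>
    simp only [List.foldl_cons, List.countP_cons]
    by_cases hA : PySem.Chars.isalpha x = true
    · rw [if_pos hA, pvMk5_insert_letters, ih]
      have hD : PySem.Chars.isdigit x = false := by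
        cases h : PySem.Chars.isdigit x
        · rfl
        · exact absurd (pv_digit_not_alpha x h) (by simp [hA])
      have hS := pv_alpha_not_space x hA
      simp [hA, hD, hS, pvMk5]
      omega
    · by_cases hD : PySem.Chars.isdigit x = true
      · rw [if_neg (by simp [hA]), if_pos hD, pvMk5_insert_digits, ih]
        have hS := pv_digit_not_space x hD
        simp [hA, hD, hS, pvMk5]
        omega
      · by_cases hS : PySem.Chars.isspace x = true
        · rw [if_neg (by simp [hA]), if_neg (by simp [hD]), if_pos hS, pvMk5_insert_spaces, ih]
          simp [hA, hD, hS, pvMk5]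
          omega
        · rw [if_neg (by simp [hA]), if_neg (by simp [hD]), if_neg (by simp [hS]), pvMk5_insert_punct, ih]
          simp [hA, hD, hS, pvMk5]
          omega

-- the four classes partition the characters
theorem pv_partition (l : List Char) :
    l.countP (fun c => PySem.Chars.isalpha c) + l.countP (fun c => PySem.Chars.isdigit c)
      + l.countP (fun c => PySem.Chars.isspace c)
      + l.countP (fun c => !PySem.Chars.isalpha c && !PySem.Chars.isdigit c && !PySem.Chars.isspace c)
    = l.length := by
  induction l with
  | nil => simp
  | cons x xs ih =>
    simp only [List.countP_cons, List.length_cons]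
    by_cases hA : PySem.Chars.isalpha x = true
    · have hD : PySem.Chars.isdigit x = false := by
        by_contra h
        exact absurd (pv_digit_not_alpha x (by revert h; cases PySem.Chars.isdigit x <;> simp)) (by simp [hA])
      have hS := pv_alpha_not_space x hA
      simp [hA, hD, hS]; omega
    · by_cases hD : PySem.Chars.isdigit x = true
      · have hS := pv_digit_not_space x hD
        simp [hA, hD, hS]; omega
      · by_cases hS : PySem.Chars.isspace x = true
        · simp [hA, hD, hS]; omega
        · simp [hA, hD, hS]; omega

-- ===== VERDICT (by name: the statement is the Claim_ definition above) =====
theorem count_text_elements_spec : Claim_equal_count_text_elements := by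
  intro text _
  unfold Spec_count_text_elements count_text_elements count_text_elements_alt
  simp only [pvMk5_ofList, pvMk5_insert_words]
  rw [pv_fold5]
  have hp := pv_partition (PySem.Str.strip text).toList
  simp only [pvMk5, zero_add, List.cons.injEq, Prod.mk.injEq, and_true, true_and]
  omega
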